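-- pv_equiv track=rewrite | github.com/hazardscarn/energyagentai | marketing_agent/agent.py | _parse_email_content
-- ===== SOURCE A (Python) =====
-- from typing import Optional, Dict, Any
--
-- def _parse_email_content(content: str) -> Dict:
--     """Parse email content into structured format"""
--     sections = {}
--     lines = content.split('\n')
--     current_section = "full_content"
--     current_text = []
--
--     indicators = ['subject line:', 'email content:', 'mobile optimization:', 'a/b test variants:', 'conversion strategy:']
--
--     for line in lines:
--         line_clean = line.strip()
--         if not line_clean:
--             continue
--
--         line_lower = line_clean.lower()
--         is_section = any(indicator in line_lower for indicator in indicators)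
--
--         if is_section:
--             if current_text:
--                 sections[current_section] = '\n'.join(current_text)
--             current_section = line_lower.replace(':', '').strip().replace(' ', '_')
--             current_text = []
--         else:
--             current_text.append(line_clean)
--
--     if current_text:
--         sections[current_section] = '\n'.join(current_text)
--
--     sections["full_content"] = content
--     return sections
-- ===== SOURCE B (Python) =====
-- _INDICATORS = ['subject line:', 'email content:', 'mobile optimization:', 'a/b test variants:', 'conversion strategy:']
--
-- def _is_header(ln):
--     return any(ind in ln.lower() for ind in _INDICATORS)
--
-- def _key_of(ln):
--     return ln.lower().replace(':', '').strip().replace(' ', '_')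
--
-- def _parse_email_content(content: str):
--     """Two-pass segmentation: cut the cleaned lines at header lines, then emit one
--     (key, body) item per segment and load them into the dict at the end."""
--     cleaned = [ln.strip() for ln in content.split('\n')]
--     items = []
--     key = "full_content"
--     rest = cleaned
--     while True:
--         i = 0
--         while i < len(rest) and not _is_header(rest[i]):
--             i += 1
--         body = [ln for ln in rest[:i] if ln]
--         if body:
--             items.append((key, '\n'.join(body)))
--         if i == len(rest):
--             break
--         key = _key_of(rest[i])
--         rest = rest[i + 1:]
--     sections = {}
--     for k, v in items:
--         sections[k] = v
--     sections["full_content"] = content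
--     return sections
-- ===== Notes on version B (the rewrite author's own statement) =====
-- stated objective: alternative
-- what changed: A's single per-line fold carrying mutable current_section/current_text is replaced by a two-pass segmentation: strip all lines, cut the list at header lines via takeWhile/dropWhile, emit one (key, joined-body) item per non-empty segment, then load the item list into the dict at the end.
import Mathlib
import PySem

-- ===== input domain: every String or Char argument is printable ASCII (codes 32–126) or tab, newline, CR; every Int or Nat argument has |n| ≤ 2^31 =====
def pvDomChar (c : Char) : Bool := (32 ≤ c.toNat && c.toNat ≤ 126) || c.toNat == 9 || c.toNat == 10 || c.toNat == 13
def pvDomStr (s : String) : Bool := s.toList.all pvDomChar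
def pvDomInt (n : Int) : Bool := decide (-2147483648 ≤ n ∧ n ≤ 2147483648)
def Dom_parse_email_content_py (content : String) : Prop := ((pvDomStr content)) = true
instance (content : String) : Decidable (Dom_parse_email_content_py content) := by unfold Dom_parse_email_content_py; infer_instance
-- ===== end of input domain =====

-- B replaces A's single per-line fold (mutable current_section/current_text) by a two-pass
-- segmentation: cut the stripped lines at header lines with takeWhile/dropWhile, emit one
-- (key, body) item per segment, and load the items into the dict afterwards (objective: alternative).

-- ===== PORT A =====
def pvIndicators : List String :=
  ["subject line:", "email content:", "mobile optimization:", "a/b test variants:", "conversion strategy:"]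

-- A's for-loop as structural recursion over the same state (sections, current_section, current_text)
def pvGoA (lines : List String) (sections : PySem.Dict String String)
    (cur : String) (text : List String) : PySem.Dict String String :=
  match lines with
  | [] => if text ≠ [] then sections.insert cur (PySem.Str.join "\n" text) else sections
  | line :: ls =>
      let lineClean := PySem.Str.strip line
      if lineClean = "" then pvGoA ls sections cur text
      else
        let lineLower := PySem.Str.lower lineClean
        if pvIndicators.any (fun ind => PySem.Str.isIn ind lineLower) then
          let sections' := if text ≠ [] then sections.insert cur (PySem.Str.join "\n" text) else sections
          pvGoA ls sections'
            (PySem.Str.replace (PySem.Str.strip (PySem.Str.replace lineLower ":" "")) " " "_") []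
        else pvGoA ls sections cur (text ++ [lineClean])

def parse_email_content_py (content : String) : List (String × String) :=
  let lines := (PySem.Str.split? content "\n").getD []   -- sep "\n" ≠ "": split? is never none
  let sections := pvGoA lines PySem.Dict.empty "full_content" []
  (sections.insert "full_content" content).items

-- ===== PORT B =====
def pvIsHeader (ln : String) : Bool :=
  pvIndicators.any (fun ind => PySem.Str.isIn ind (PySem.Str.lower ln))

def pvKeyOf (ln : String) : String :=
  PySem.Str.replace (PySem.Str.strip (PySem.Str.replace (PySem.Str.lower ln) ":" "")) " " "_"

-- B's outer while-loop: rest[:i] (lines before the first header) is takeWhile, rest[i:] dropWhile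
def pvSegB (key : String) (rest : List String) : List (String × String) :=
  let body := (rest.takeWhile (fun l => !pvIsHeader l)).filter (fun l => l ≠ "")
  let items := if body ≠ [] then [(key, PySem.Str.join "\n" body)] else []
  match _h : rest.dropWhile (fun l => !pvIsHeader l) with
  | [] => items
  | hd :: tl => items ++ pvSegB (pvKeyOf hd) tl
termination_by rest.length
decreasing_by
  have := List.length_dropWhile_le (fun l => !pvIsHeader l) rest
  rw [_h] at this; simp at this; omega

def parse_email_content_py_alt (content : String) : List (String × String) :=
  let cleaned := ((PySem.Str.split? content "\n").getD []).map PySem.Str.strip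
  let items := pvSegB "full_content" cleaned
  let sections := items.foldl (fun d kv => d.insert kv.1 kv.2) PySem.Dict.empty
  (sections.insert "full_content" content).items

-- ===== PRECONDITION & SPEC =====
def Spec_parse_email_content_py (content : String) (out : List (String × String)) : Prop := out = parse_email_content_py_alt content
instance (content : String) (out : List (String × String)) : Decidable (Spec_parse_email_content_py content out) := by unfold Spec_parse_email_content_py; infer_instance

-- ===== CLAIM (what is proved, stated in full; the proofs are below) =====
def Claim_equal_parse_email_content_py : Prop := ∀ (content : String), Dom_parse_email_content_py content → Spec_parse_email_content_py content (parse_email_content_py content)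

-- ===== LEMMAS AND PROOFS =====

-- proof-side: B's segmentation generalized with the pending body `text` (A's current_text)
def pvSegP (cur : String) (text : List String) : List String → List (String × String)
  | [] => if text ≠ [] then [(cur, PySem.Str.join "\n" text)] else []
  | c :: ls =>
      if c = "" then pvSegP cur text ls
      else if pvIsHeader c then
        (if text ≠ [] then [(cur, PySem.Str.join "\n" text)] else []) ++ pvSegP (pvKeyOf c) [] ls
      else pvSegP cur (text ++ [c]) ls

theorem pvIsHeader_empty : pvIsHeader "" = false := by decide

-- A's fold equals: run B's segment list through the dict inserts
theorem pvGoA_eq_segP (lines : List String) (d : PySem.Dict String String)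
    (cur : String) (text : List String) :
    pvGoA lines d cur text =
      (pvSegP cur text (lines.map PySem.Str.strip)).foldl (fun d kv => d.insert kv.1 kv.2) d := by
  induction lines generalizing d cur text with
  | nil =>
      simp only [pvGoA, List.map_nil, pvSegP]
      split <;> simp
  | cons line ls ih =>
      simp only [pvGoA, List.map_cons, pvSegP]
      by_cases hc : PySem.Str.strip line = ""
      · simp [hc, ih]
      · simp only [hc, if_false]
        by_cases hh : pvIsHeader (PySem.Str.strip line) = true
        · have hh' : (pvIndicators.any fun ind =>
              PySem.Str.isIn ind (PySem.Str.lower (PySem.Str.strip line))) = true := hh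
          simp only [hh', hh, if_true, List.foldl_append]
          rw [ih]
          have hbase : List.foldl (fun d kv => d.insert kv.1 kv.2) d
              (if text ≠ [] then [(cur, PySem.Str.join "\n" text)] else []) =
              (if text ≠ [] then d.insert cur (PySem.Str.join "\n" text) else d) := by
            split <;> simp
          rw [hbase]
          rfl
        · have hh' : (pvIndicators.any fun ind =>
              PySem.Str.isIn ind (PySem.Str.lower (PySem.Str.strip line))) = false := by
            simpa [pvIsHeader] using hh
          simp only [hh', Bool.false_eq_true, if_false, hh, ih]

-- pvSegB's defining equation in closed form
theorem pvSegB_eq (k : String) (ls : List String) :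
    pvSegB k ls =
      (if ((ls.takeWhile (fun l => !pvIsHeader l)).filter (fun l => l ≠ "") ≠ [])
        then [(k, PySem.Str.join "\n" ((ls.takeWhile (fun l => !pvIsHeader l)).filter (fun l => l ≠ "")))] else [])
      ++ (match ls.dropWhile (fun l => !pvIsHeader l) with
          | [] => []
          | hd :: tl => pvSegB (pvKeyOf hd) tl) := by
  rw [pvSegB.eq_def]
  cases hdl : ls.dropWhile (fun l => !pvIsHeader l) <;> simp

-- B's takeWhile/dropWhile recursion equals the generalized per-line recursion
theorem pvSegP_eq_segB (lines : List String) (cur : String) (text : List String) :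
    pvSegP cur text lines =
      (if (text ++ (lines.takeWhile (fun l => !pvIsHeader l)).filter (fun l => l ≠ "")) ≠ []
        then [(cur, PySem.Str.join "\n"
          (text ++ (lines.takeWhile (fun l => !pvIsHeader l)).filter (fun l => l ≠ "")))] else [])
      ++ (match lines.dropWhile (fun l => !pvIsHeader l) with
          | [] => []
          | hd :: tl => pvSegB (pvKeyOf hd) tl) := by
  induction lines generalizing cur text with
  | nil => simp [pvSegP]
  | cons c ls ih =>
      by_cases hc : c = ""
      · subst hc
        rw [List.takeWhile_cons_of_pos (by simp [pvIsHeader_empty]),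
            List.dropWhile_cons_of_pos (by simp [pvIsHeader_empty]),
            List.filter_cons_of_neg (by simp)]
        simpa [pvSegP] using ih cur text
      · by_cases hh : pvIsHeader c = true
        · rw [List.takeWhile_cons_of_neg (by simp [hh]),
              List.dropWhile_cons_of_neg (by simp [hh])]
          simp only [pvSegP, if_neg hc, hh, if_true, List.filter_nil, List.append_nil]
          congr 1
          rw [ih (pvKeyOf c) [], pvSegB_eq]
          simp
        · have hh' : pvIsHeader c = false := by simpa using hh
          rw [List.takeWhile_cons_of_pos (by simp [hh']),
              List.dropWhile_cons_of_pos (by simp [hh']),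
              List.filter_cons_of_pos (by simpa using hc)]
          simp only [pvSegP, if_neg hc, hh', Bool.false_eq_true, if_false]
          rw [ih cur (text ++ [c])]
          simp

-- ===== VERDICT (by name: the statement is the Claim_ definition above) =====
theorem parse_email_content_py_spec : Claim_equal_parse_email_content_py := by
  intro content _
  unfold Spec_parse_email_content_py parse_email_content_py parse_email_content_py_alt
  dsimp only
  have h1 := pvGoA_eq_segP ((PySem.Str.split? content "\n").getD [])
      PySem.Dict.empty "full_content" []
  have h2 := pvSegP_eq_segB (((PySem.Str.split? content "\n").getD []).map PySem.Str.strip)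
      "full_content" []
  rw [pvSegB_eq]
  simp only [List.nil_append] at h2
  rw [h1, h2]
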